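-- pv_equiv track=rewrite | github.com/CherWeiYuan/Co-SplicingIndices | csi.py | sort_replicates
-- ===== SOURCE A (Python) =====
-- from collections import OrderedDict
--
-- def sort_replicates(lst):
--     d = {}
--     final_lst = []
--
--     # Generate dictionary
--     for x, y in lst:
--         d[x] = y
--
--     # Make sorted dictionary into OrderedDict to preserve the order
--     od = OrderedDict(sorted(d.items()))
--
--     # Return list of values in sorted OrderedDict
--     for key, value in od.items():
--         final_lst += [value]
--
--     return final_lst
-- ===== SOURCE B (Python) =====
-- def sort_replicates(lst):
--     # Stable sort by key, then one grouping pass keeping the last value of each key group.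
--     pairs = sorted(lst, key=lambda p: p[0])
--     final_lst = []
--     cur = None
--     for x, y in pairs:
--         if cur is not None and x != cur[0]:
--             final_lst += [cur[1]]
--         cur = (x, y)
--     if cur is not None:
--         final_lst += [cur[1]]
--     return final_lst
-- ===== Notes on version B (the rewrite author's own statement) =====
-- stated objective: alternative
-- what changed: Replaces A's dict-overwrite-then-sort-items pipeline by a stable sort of the raw pairs on the key followed by a single grouping scan that emits the last value of each run of equal keys.
import Mathlib
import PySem

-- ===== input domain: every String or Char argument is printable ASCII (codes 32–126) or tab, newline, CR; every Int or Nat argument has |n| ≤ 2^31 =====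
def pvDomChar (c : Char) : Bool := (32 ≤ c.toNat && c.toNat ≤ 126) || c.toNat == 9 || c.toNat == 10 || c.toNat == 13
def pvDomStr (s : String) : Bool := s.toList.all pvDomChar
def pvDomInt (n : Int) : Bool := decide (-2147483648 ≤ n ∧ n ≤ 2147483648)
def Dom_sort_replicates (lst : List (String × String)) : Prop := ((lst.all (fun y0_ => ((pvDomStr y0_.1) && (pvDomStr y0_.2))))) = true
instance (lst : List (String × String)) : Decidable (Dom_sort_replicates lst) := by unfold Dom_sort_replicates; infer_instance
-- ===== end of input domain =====

-- B replaces A's dict-overwrite-then-sort-items pipeline by a stable sort of the raw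
-- pairs on the key followed by one grouping scan emitting the last value of each key run
-- (objective: alternative decomposition, same asymptotic cost).

-- ===== PORT A =====
def sort_replicates (lst : List (String × String)) : List String :=
  -- d = {}; for x, y in lst: d[x] = y
  let d := lst.foldl (fun d p => d.insert p.1 p.2) (PySem.Dict.empty : PySem.Dict String String)
  -- od = OrderedDict(sorted(d.items()))  -- tuples compare lexicographically
  let od := PySem.List.sorted2 d.items (fun p => p.1) (fun p => p.2)
  -- for key, value in od.items(): final_lst += [value]
  od.foldl (fun acc p => acc ++ [p.2]) []

-- ===== PORT B =====
def sort_replicates_alt (lst : List (String × String)) : List String :=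
  -- pairs = sorted(lst, key=lambda p: p[0])  (stable)
  let pairs := PySem.List.sorted lst (fun p => p.1)
  -- one grouping pass with state (final_lst, cur)
  let st := pairs.foldl
    (fun (st : List String × Option (String × String)) p =>
      match st.2 with
      | none => (st.1, some p)
      | some cur => if p.1 ≠ cur.1 then (st.1 ++ [cur.2], some p) else (st.1, some p))
    ([], none)
  match st.2 with
  | none => st.1
  | some cur => st.1 ++ [cur.2]

-- ===== PRECONDITION & SPEC =====
def Spec_sort_replicates (lst : List (String × String)) (out : List String) : Prop := out = sort_replicates_alt lst
instance (lst : List (String × String)) (out : List String) : Decidable (Spec_sort_replicates lst out) := by unfold Spec_sort_replicates; infer_instance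

-- ===== CLAIM (what is proved, stated in full; the proofs are below) =====
def Claim_equal_sort_replicates : Prop := ∀ (lst : List (String × String)), Dom_sort_replicates lst → Spec_sort_replicates lst (sort_replicates lst)

-- ===== LEMMAS AND PROOFS =====

-- last value stored under key k in l ("" if k does not occur)
def lastVal (l : List (String × String)) (k : String) : String :=
  (((l.filter (fun p => p.1 == k)).getLast?).map Prod.snd).getD ""

-- the grouping scan of port B, in recursive form
def bScanAux : Option (String × String) → List (String × String) → List String
  | none, [] => []
  | some c, [] => [c.2]
  | none, p :: r => bScanAux (some p) r
  | some c, p :: r => if p.1 ≠ c.1 then c.2 :: bScanAux (some p) r else bScanAux (some p) r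

theorem insertBy_nil {α : Type} (b : α → α → Bool) (x : α) : PySem.List.insertBy b x [] = [x] := rfl

theorem insertBy_cons {α : Type} (b : α → α → Bool) (x y : α) (ys : List α) :
    PySem.List.insertBy b x (y :: ys) = if b x y then x :: y :: ys else y :: PySem.List.insertBy b x ys := rfl

-- A's dict lookup after the insertion loop is the last value stored for the key
theorem getD_foldl_insert_pairs (l : List (String × String)) (d : PySem.Dict String String) (k : String) :
    (l.foldl (fun d p => d.insert p.1 p.2) d).getD k "" =
      (((l.filter (fun p => p.1 == k)).getLast?).map Prod.snd).getD (d.getD k "") := by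
  induction l generalizing d with
  | nil => rfl
  | cons p l ih =>
    simp only [List.foldl_cons]
    rw [ih (d.insert p.1 p.2)]
    rcases e : l.filter (fun p => p.1 == k) with _ | ⟨h, t⟩
    · by_cases hk : p.1 = k
      · subst hk
        simp [e]
      · have hk' : ¬ k = p.1 := fun he => hk he.symm
        rw [List.filter_cons_of_neg (by simp [hk]), e]
        simp [PySem.Dict.getD_insert, hk']
    · rcases hq : (h :: t).getLast? with _ | q
      · simp at hq
      · by_cases hk : p.1 = k
        · subst hk
          simp [e, List.getLast?_cons_cons, hq]
        · simp [e, hk, hq]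

theorem getD_fold_eq_lastVal (lst : List (String × String)) (k : String) :
    (lst.foldl (fun d p => d.insert p.1 p.2) (PySem.Dict.empty : PySem.Dict String String)).getD k ""
      = lastVal lst k := by
  rw [getD_foldl_insert_pairs, PySem.Dict.getD_empty]
  rfl

theorem keys_fold (lst : List (String × String)) :
    (lst.foldl (fun d p => d.insert p.1 p.2) (PySem.Dict.empty : PySem.Dict String String)).keys
      = PySem.Set.ofList (lst.map (fun p => p.1)) := by
  have h := PySem.Dict.keys_foldl_insert_key (ν := String) lst (fun p => p.1) (fun _ p => p.2) PySem.Dict.empty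
  simpa [PySem.Dict.keys_empty, PySem.Set.update_nil_left] using h

-- comparator congruence for insertion sort
theorem insertBy_congr {α : Type} (b1 b2 : α → α → Bool) (x : α) (acc : List α)
    (h : ∀ y ∈ acc, b1 x y = b2 x y) :
    PySem.List.insertBy b1 x acc = PySem.List.insertBy b2 x acc := by
  induction acc with
  | nil => rfl
  | cons y ys ih =>
    rw [insertBy_cons, insertBy_cons, h y (by simp)]
    by_cases hb : b2 x y = true
    · simp [hb]
    · simp only [Bool.not_eq_true] at hb
      simp only [hb]
      rw [ih (fun z hz => h z (by simp [hz]))]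

theorem foldl_insertBy_congr {α : Type} (b1 b2 : α → α → Bool) :
    ∀ (xs acc : List α), (∀ a ∈ xs, ∀ y, (y ∈ acc ∨ y ∈ xs) → b1 a y = b2 a y) →
      xs.foldl (fun acc x => PySem.List.insertBy b1 x acc) acc
        = xs.foldl (fun acc x => PySem.List.insertBy b2 x acc) acc := by
  intro xs
  induction xs with
  | nil => intro acc _; rfl
  | cons x xs ih =>
    intro acc h
    simp only [List.foldl_cons]
    rw [insertBy_congr b1 b2 x acc (fun y hy => h x (by simp) y (Or.inl hy))]
    apply ih
    intro a ha y hy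
    apply h a (by simp [ha])
    rcases hy with hy | hy
    · rcases (PySem.List.mem_insertBy b2 x y acc).mp hy with h1 | h1
      · exact Or.inr (by simp [h1])
      · exact Or.inl h1
    · exact Or.inr (by simp [hy])

-- on a list whose keys determine the elements, sorting by (fst, snd) is sorting by fst
theorem sorted2_eq_sorted_fst (xs : List (String × String))
    (h : ∀ a ∈ xs, ∀ b ∈ xs, a.1 = b.1 → a = b) :
    PySem.List.sorted2 xs (fun p => p.1) (fun p => p.2) = PySem.List.sorted xs (fun p => p.1) := by
  show xs.foldl (fun acc x => PySem.List.insertBy _ x acc) [] = _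
  rw [PySem.List.sorted_eq_foldl_insertBy]
  apply foldl_insertBy_congr
  intro a ha y hy
  have hy' : y ∈ xs := hy.elim (fun hm => absurd hm (List.not_mem_nil)) id
  by_cases hay : a = y
  · subst hay; simp
  · have hne : a.1 ≠ y.1 := fun he => hay (h a ha y hy' he)
    rcases lt_trichotomy a.1 y.1 with hlt | heq | hgt
    · simp [hlt]
    · exact absurd heq hne
    · simp [hgt, not_lt_of_gt hgt]

-- stability: insertion into a key-sorted list goes after the equal-key run
theorem filter_insertBy (k : String) (x : String × String) :
    ∀ (acc : List (String × String)), acc.Pairwise (fun a b => a.1 ≤ b.1) →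
      (PySem.List.insertBy (fun a b => decide (a.1 < b.1)) x acc).filter (fun p => p.1 == k)
        = if x.1 == k then acc.filter (fun p => p.1 == k) ++ [x]
          else acc.filter (fun p => p.1 == k) := by
  intro acc
  induction acc with
  | nil =>
    intro _
    rw [insertBy_nil]
    by_cases hk : x.1 = k <;> simp [hk]
  | cons y ys ih =>
    intro hpw
    rw [insertBy_cons]
    by_cases hlt : x.1 < y.1
    · rw [if_pos (by simpa using hlt)]
      by_cases hk : x.1 = k
      · have hnil : (y :: ys).filter (fun p => p.1 == k) = [] := by
          apply List.filter_eq_nil_iff.mpr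
          intro z hz hzk
          have hz1 : z.1 = k := by simpa using hzk
          have hxz : x.1 < z.1 := by
            rcases List.mem_cons.mp hz with hz' | hz'
            · exact hz' ▸ hlt
            · exact lt_of_lt_of_le hlt ((List.pairwise_cons.mp hpw).1 z hz')
          exact absurd (hk.trans hz1.symm) (ne_of_lt hxz)
        rw [hnil, List.filter_cons_of_pos (by simp [hk]), hnil]
        simp [hk]
      · rw [List.filter_cons_of_neg (by simp [hk])]
        simp [hk]

    · rw [if_neg (by simpa using hlt)]
      have ihys := ih (List.pairwise_cons.mp hpw).2
      simp only [List.filter_cons]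
      rw [ihys]
      by_cases hk : x.1 = k <;> by_cases hyk : y.1 = k <;> simp [hk, hyk]

theorem filter_sorted (lst : List (String × String)) (k : String) :
    (PySem.List.sorted lst (fun p => p.1)).filter (fun p => p.1 == k)
      = lst.filter (fun p => p.1 == k) := by
  induction lst using List.reverseRecOn with
  | nil => rfl
  | append_singleton xs x ih =>
    rw [PySem.List.sorted_eq_foldl_insertBy, List.foldl_append, ← PySem.List.sorted_eq_foldl_insertBy]
    simp only [List.foldl_cons, List.foldl_nil]
    rw [filter_insertBy k x _ (PySem.List.sorted_pairwise xs (fun p => p.1))]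
    rw [ih, List.filter_append]
    by_cases hk : x.1 = k <;> simp [hk]

-- the foldl of port B computes bScanAux
theorem foldl_eq_bScanAux :
    ∀ (S : List (String × String)) (out : List String) (cur : Option (String × String)),
      (match (S.foldl
        (fun (st : List String × Option (String × String)) p =>
          match st.2 with
          | none => (st.1, some p)
          | some cur => if p.1 ≠ cur.1 then (st.1 ++ [cur.2], some p) else (st.1, some p))
        (out, cur)).2 with
       | none => (S.foldl
        (fun (st : List String × Option (String × String)) p =>
          match st.2 with
          | none => (st.1, some p)
          | some cur => if p.1 ≠ cur.1 then (st.1 ++ [cur.2], some p) else (st.1, some p))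
        (out, cur)).1
       | some c => (S.foldl
        (fun (st : List String × Option (String × String)) p =>
          match st.2 with
          | none => (st.1, some p)
          | some cur => if p.1 ≠ cur.1 then (st.1 ++ [cur.2], some p) else (st.1, some p))
        (out, cur)).1 ++ [c.2])
      = out ++ bScanAux cur S := by
  intro S
  induction S with
  | nil =>
    intro out cur
    cases cur <;> simp [bScanAux]
  | cons p S ih =>
    intro out cur
    cases cur with
    | none => simpa [bScanAux] using ih out (some p)
    | some c =>
      by_cases h : p.1 = c.1
      · simpa [bScanAux, h] using ih out (some p)
      · simpa [bScanAux, h, List.append_assoc] using ih (out ++ [c.2]) (some p)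

-- a pairwise-≤ list dedups to a pairwise-< list
theorem pairwise_lt_ofList (m : List String) (h : m.Pairwise (· ≤ ·)) :
    (PySem.Set.ofList m).Pairwise (· < ·) := by
  induction m with
  | nil => simp [PySem.Set.ofList, PySem.Set.empty]
  | cons x m ih =>
    rw [PySem.Set.ofList_cons]
    refine List.pairwise_cons.mpr ⟨?_, ?_⟩
    · intro y hy
      simp only [PySem.Set.discard, List.mem_filter, Bool.not_eq_eq_eq_not, Bool.not_true,
        beq_eq_false_iff_ne] at hy
      obtain ⟨hy1, hy2⟩ := hy
      exact lt_of_le_of_ne ((List.pairwise_cons.mp h).1 y ((PySem.Set.mem_ofList m y).mp hy1))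
        (Ne.symm hy2)
    · exact List.Pairwise.filter _ (ih (List.pairwise_cons.mp h).2)

-- the grouping scan on a key-sorted list lists the last value of each distinct key
theorem bScanAux_sorted :
    ∀ (S : List (String × String)) (c : String × String),
      (c :: S).Pairwise (fun a b => a.1 ≤ b.1) →
      bScanAux (some c) S
        = (PySem.Set.ofList ((c :: S).map (fun p => p.1))).map (lastVal (c :: S)) := by
  intro S
  induction S with
  | nil =>
    intro c _
    simp [bScanAux, PySem.Set.ofList, PySem.Set.empty, lastVal]
  | cons p r ih =>
    intro c hpw
    have hcp : c.1 ≤ p.1 := (List.pairwise_cons.mp hpw).1 p (by simp)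
    have hpwtail : (p :: r).Pairwise (fun a b => a.1 ≤ b.1) := (List.pairwise_cons.mp hpw).2
    by_cases h : p.1 = c.1
    · -- same key: c's value is overwritten by p's
      have hscan : bScanAux (some c) (p :: r) = bScanAux (some p) r := by
        simp [bScanAux, h]
      rw [hscan, ih p hpwtail]
      have hkeys : PySem.Set.ofList ((c :: p :: r).map (fun q => q.1))
          = PySem.Set.ofList ((p :: r).map (fun q => q.1)) := by
        simp only [List.map_cons]
        rw [show c.1 = p.1 from h.symm]
        simp [PySem.Set.ofList_cons, PySem.Set.discard, List.filter_filter]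
      rw [hkeys]
      apply List.map_congr_left
      intro k hk
      by_cases hck : c.1 = k
      · have hpk : p.1 = k := h.trans hck
        simp [lastVal, hck, hpk, List.getLast?_cons_cons]
      · simp [lastVal, List.filter_cons, hck]
    · -- new key: flush c's value
      have hlt : c.1 < p.1 := lt_of_le_of_ne hcp (fun he => h he.symm)
      have hnotmem : c.1 ∉ (p :: r).map (fun q => q.1) := by
        intro hm
        rcases List.mem_map.mp hm with ⟨z, hz, hzk⟩
        rcases List.mem_cons.mp hz with hz' | hz'
        · exact h (hz' ▸ hzk)
        · have : p.1 ≤ z.1 := (List.pairwise_cons.mp hpwtail).1 z hz'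
          exact absurd (hzk ▸ this) (not_le_of_gt hlt)
      have hscan : bScanAux (some c) (p :: r) = c.2 :: bScanAux (some p) r := by
        simp [bScanAux, h]
      rw [hscan, ih p hpwtail]
      have hkeys : PySem.Set.ofList ((c :: p :: r).map (fun q => q.1))
          = c.1 :: PySem.Set.ofList ((p :: r).map (fun q => q.1)) := by
        rw [List.map_cons, PySem.Set.ofList_cons]
        congr 1
        rw [PySem.Set.discard]
        apply List.filter_eq_self.mpr
        intro y hy
        have hym : y ∈ (p :: r).map (fun q => q.1) :=
          (PySem.Set.mem_ofList _ y).mp hy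
        have hyne : y ≠ c.1 := fun he => hnotmem (he ▸ hym)
        simp [hyne]
      rw [hkeys, List.map_cons]
      congr 1
      · -- head: last value for c.1 is c.2
        have hfilnil : (p :: r).filter (fun q => q.1 == c.1) = [] := by
          apply List.filter_eq_nil_iff.mpr
          intro z hz hzc
          exact hnotmem (List.mem_map.mpr ⟨z, hz, by simpa using hzc⟩)
        simp [lastVal, hfilnil]
      · apply List.map_congr_left
        intro k hk
        have hkc : k ≠ c.1 := fun he => hnotmem (he ▸ (PySem.Set.mem_ofList _ k).mp hk)
        have hck : ¬ (c.1 = k) := fun he => hkc he.symm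
        simp [lastVal, List.filter_cons, hck]

-- port A computes: sorted distinct keys, each mapped to its last value in lst
theorem portA_eq (lst : List (String × String)) :
    sort_replicates lst
      = (PySem.Set.ofList ((PySem.List.sorted lst (fun p => p.1)).map (fun p => p.1))).map
          (lastVal lst) := by
  simp only [sort_replicates]
  have hkeys := keys_fold lst
  set d := lst.foldl (fun d p => d.insert p.1 p.2) (PySem.Dict.empty : PySem.Dict String String) with hd
  have hnodup : d.keys.Nodup := by rw [hkeys]; exact PySem.Set.nodup_ofList _
  have hinj : ∀ a ∈ d.items, ∀ b ∈ d.items, a.1 = b.1 → a = b := by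
    intro a ha b hb he
    have h1 := PySem.Dict.get?_of_mem_items d (show (a.1, a.2) ∈ d.items by simpa using ha) hnodup
    have h2 := PySem.Dict.get?_of_mem_items d (show (b.1, b.2) ∈ d.items by simpa using hb) hnodup
    rw [he] at h1
    rw [h1] at h2
    have : a.2 = b.2 := by injection h2
    exact Prod.ext he this
  rw [sorted2_eq_sorted_fst d.items hinj]
  have hperm : ((PySem.Set.ofList ((PySem.List.sorted lst (fun p => p.1)).map (fun p => p.1))).map
      (fun k => (k, d.getD k ""))).Perm d.items := by
    rw [PySem.Dict.items_eq_map_keys d hnodup ""]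
    apply List.Perm.map
    rw [hkeys]
    apply (List.perm_ext_iff_of_nodup (PySem.Set.nodup_ofList _) (PySem.Set.nodup_ofList _)).mpr
    intro a
    simp [PySem.Set.mem_ofList, List.mem_map, PySem.List.mem_sorted]
  have hpw2 : ((PySem.Set.ofList ((PySem.List.sorted lst (fun p => p.1)).map (fun p => p.1))).map
      (fun k => (k, d.getD k ""))).Pairwise (fun a b => a.1 < b.1) := by
    rw [List.pairwise_map]
    exact pairwise_lt_ofList _
      (List.pairwise_map.mpr (PySem.List.sorted_pairwise lst (fun p => p.1)))
  rw [PySem.List.sorted_eq_of_perm_of_pairwise_lt d.items _ (fun p => p.1) hperm hpw2]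
  rw [PySem.List.foldl_append_singleton_eq_map (fun p : String × String => p.2)]
  simp only [List.nil_append, List.map_map]
  apply List.map_congr_left
  intro k _
  simp only [Function.comp]
  rw [hd]
  exact getD_fold_eq_lastVal lst k

-- port B computes the same normal form
theorem portB_eq (lst : List (String × String)) :
    sort_replicates_alt lst
      = (PySem.Set.ofList ((PySem.List.sorted lst (fun p => p.1)).map (fun p => p.1))).map
          (lastVal lst) := by
  simp only [sort_replicates_alt]
  rw [foldl_eq_bScanAux (PySem.List.sorted lst (fun p => p.1)) [] none, List.nil_append]
  rcases hS : PySem.List.sorted lst (fun p => p.1) with _ | ⟨c, S'⟩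
  · simp [bScanAux, PySem.Set.ofList, PySem.Set.empty]
  · have hpw := PySem.List.sorted_pairwise lst (fun p => p.1)
    rw [hS] at hpw
    rw [show bScanAux none (c :: S') = bScanAux (some c) S' from rfl]
    rw [bScanAux_sorted S' c hpw]
    apply List.map_congr_left
    intro k _
    have hf := filter_sorted lst k
    rw [hS] at hf
    simp only [lastVal, hf]

-- ===== VERDICT (by name: the statement is the Claim_ definition above) =====
theorem sort_replicates_spec : Claim_equal_sort_replicates := by
  intro lst _
  unfold Spec_sort_replicates
  rw [portA_eq, portB_eq]
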